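-- pv_equiv track=rewrite | github.com/MOH-YAHIA/NetC-Compiler | src/netc_streamlit.py | extract_ast
-- ===== SOURCE A (Python) =====
-- def extract_ast(output):
--     """Extract AST from compiler output"""
--     if "Program" in output:
--         ast_lines = []
--         in_ast = False
--         for line in output.split('\n'):
--             if line.strip().startswith("Program"):
--                 in_ast = True
--             if in_ast:
--                 if line.startswith("===") and "completed" in line:
--                     break
--                 ast_lines.append(line)
--
--         if ast_lines:
--             return '\n'.join(ast_lines)
--     return None
-- ===== SOURCE B (Python) =====
-- def extract_ast(output):
--     """Extract AST from compiler output"""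
--     lines = output.split('\n')
--     i = next((k for k, line in enumerate(lines)
--               if line.strip().startswith("Program")), None)
--     if i is None:
--         return None
--     j = next((k for k in range(i, len(lines))
--               if lines[k].startswith("===") and "completed" in lines[k]), None)
--     return '\n'.join(lines[i:] if j is None else lines[i:j])
-- ===== Notes on version B (the rewrite author's own statement) =====
-- stated objective: simpler
-- what changed: B drops A's threaded in_ast flag, growing accumulator and redundant substring guard over the whole output: it locates the index of the block's first line and of the terminator line by two index searches, then returns the join of the slice between them.
import Mathlib
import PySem

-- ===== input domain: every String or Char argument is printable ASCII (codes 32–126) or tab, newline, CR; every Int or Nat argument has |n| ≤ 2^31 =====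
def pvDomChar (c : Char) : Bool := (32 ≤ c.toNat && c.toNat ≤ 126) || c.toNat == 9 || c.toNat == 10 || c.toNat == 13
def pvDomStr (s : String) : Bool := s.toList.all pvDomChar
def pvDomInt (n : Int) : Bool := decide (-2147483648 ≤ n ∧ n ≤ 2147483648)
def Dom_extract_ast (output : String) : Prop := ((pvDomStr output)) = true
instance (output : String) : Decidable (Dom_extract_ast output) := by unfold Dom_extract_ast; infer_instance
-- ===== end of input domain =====

-- B replaces A's threaded in_ast flag by locating the block's start and end indices first
-- and slicing between them (objective: simpler decomposition, same linear cost).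

-- shared line tests (the literal tests both Pythons perform on a line)
def pvIsProg (l : List Char) : Bool :=
  PySem.Chars.startswith (PySem.Chars.strip l) "Program".toList

def pvIsTerm (l : List Char) : Bool :=
  PySem.Chars.startswith l "===".toList && PySem.Chars.isIn "completed".toList l

-- ===== PORT A =====
-- A's for-loop with the in_ast flag, the break and the growing ast_lines accumulator
def pvLoopA : List (List Char) → List (List Char) → Bool → List (List Char)
  | [], acc, _ => acc
  | l :: ls, acc, inAst =>
    let inAst' := if pvIsProg l then true else inAst
    if inAst' then
      if pvIsTerm l then acc
      else pvLoopA ls (acc ++ [l]) true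
    else pvLoopA ls acc inAst'

def extract_ast (output : String) : Option String :=
  if PySem.Chars.isIn "Program".toList output.toList then
    let astLines := pvLoopA (PySem.Chars.splitOn output.toList ['\n']) [] false
    if astLines ≠ [] then some (String.ofList (PySem.Chars.join ['\n'] astLines))
    else none
  else none

-- ===== PORT B =====
def extract_ast_alt (output : String) : Option String :=
  let lines := PySem.Chars.splitOn output.toList ['\n']
  match lines.findIdx? pvIsProg with
  | none => none
  | some i =>
    let tail := lines.drop i
    match tail.findIdx? pvIsTerm with
    | none => some (String.ofList (PySem.Chars.join ['\n'] tail))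
    | some j => some (String.ofList (PySem.Chars.join ['\n'] (tail.take j)))

-- ===== PRECONDITION & SPEC =====
def Spec_extract_ast (output : String) (out : Option String) : Prop := out = extract_ast_alt output
instance (output : String) (out : Option String) : Decidable (Spec_extract_ast output out) := by unfold Spec_extract_ast; infer_instance

-- ===== CLAIM (what is proved, stated in full; the proofs are below) =====
def Claim_equal_extract_ast : Prop := ∀ (output : String), Dom_extract_ast output → Spec_extract_ast output (extract_ast output)

-- ===== LEMMAS AND PROOFS =====

-- every piece produced by split('\n') is a contiguous substring of the input
theorem pv_go_infix (sep s : List Char) : ∀ (fuel : Nat) (l cur : List Char) (acc : List (List Char)),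
    (∀ p ∈ acc, p <:+: s) → (cur.reverse ++ l) <:+: s →
    ∀ p ∈ PySem.Chars.splitOn.go sep fuel l cur acc, p <:+: s := by
  intro fuel
  induction fuel with
  | zero =>
    intro l cur acc hacc hcur p hp
    simp [PySem.Chars.splitOn.go] at hp
    rcases hp with h | h <;> first | exact hacc _ h | exact h ▸ hcur
  | succ f ih =>
    intro l cur acc hacc hcur p hp
    cases l with
    | nil =>
      simp [PySem.Chars.splitOn.go] at hp
      rcases hp with h | h <;>
        first | exact hacc _ h | (subst h; simpa using hcur)
    | cons c rest =>
      rw [PySem.Chars.splitOn.go] at hp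
      split at hp
      · refine ih _ [] _ ?_ ?_ p hp
        · intro q hq
          rcases List.mem_cons.mp hq with h | h
          · subst h
            exact ((List.prefix_append cur.reverse (c :: rest)).isInfix).trans hcur
          · exact hacc _ h
        · simp only [List.reverse_nil, List.nil_append]
          exact ((List.drop_suffix _ _).isInfix).trans
            (((List.suffix_append cur.reverse (c :: rest)).isInfix).trans hcur)
      · refine ih rest (c :: cur) acc hacc ?_ p hp
        simpa using hcur

theorem pv_mem_splitOn_infix (s sep : List Char) (p : List Char)
    (hp : p ∈ PySem.Chars.splitOn s sep) : p <:+: s := by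
  unfold PySem.Chars.splitOn at hp
  exact pv_go_infix sep s _ s [] [] (by simp) (by simp) p hp

theorem pv_strip_infix (l : List Char) : PySem.Chars.strip l <:+: l := by
  have h1 : PySem.Chars.lstrip l <:+ l := List.dropWhile_suffix _
  have h2 : PySem.Chars.rstrip (PySem.Chars.lstrip l) <+: PySem.Chars.lstrip l := by
    unfold PySem.Chars.rstrip
    conv_rhs => rw [← List.reverse_reverse (PySem.Chars.lstrip l)]
    exact List.reverse_prefix.mpr (List.dropWhile_suffix _)
  exact h2.isInfix.trans h1.isInfix

theorem pv_isProg_infix (l : List Char) (h : pvIsProg l = true) :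
    "Program".toList <:+: l := by
  unfold pvIsProg at h
  rw [PySem.Chars.startswith_iff] at h
  exact h.isInfix.trans (pv_strip_infix l)

theorem pv_isProg_not_isTerm (l : List Char) (h : pvIsProg l = true) : pvIsTerm l = false := by
  cases hT : pvIsTerm l
  · rfl
  exfalso
  unfold pvIsTerm at hT
  rw [Bool.and_eq_true] at hT
  have h1 := hT.1
  rw [PySem.Chars.startswith_iff] at h1
  unfold pvIsProg at h
  rw [PySem.Chars.startswith_iff] at h
  obtain ⟨t, rfl⟩ := h1
  have hl : "===".toList ++ t = '=' :: '=' :: '=' :: t := rfl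
  rw [hl] at h
  have hls : PySem.Chars.lstrip ('=' :: '=' :: '=' :: t) = '=' :: '=' :: '=' :: t := by
    unfold PySem.Chars.lstrip
    rw [List.dropWhile_cons_of_neg (by decide)]
  have h2 : PySem.Chars.strip ('=' :: '=' :: '=' :: t) <+: '=' :: '=' :: '=' :: t := by
    unfold PySem.Chars.strip
    rw [hls]
    unfold PySem.Chars.rstrip
    conv_rhs => rw [← List.reverse_reverse ('=' :: '=' :: '=' :: t)]
    exact List.reverse_prefix.mpr (List.dropWhile_suffix _)
  obtain ⟨u, hu⟩ := h
  obtain ⟨v, hv⟩ := h2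
  rw [← hu] at hv
  simp at hv

theorem pv_loopA_true (ls : List (List Char)) : ∀ acc,
    pvLoopA ls acc true = acc ++ ls.takeWhile (fun l => !pvIsTerm l) := by
  induction ls with
  | nil => intro acc; simp [pvLoopA]
  | cons l ls ih =>
    intro acc
    by_cases ht : pvIsTerm l = true
    · simp [pvLoopA, ht]
    · have ht' : pvIsTerm l = false := by revert ht; cases pvIsTerm l <;> simp
      simp [pvLoopA, ht', ih]

theorem pv_takeWhile_not_of_findIdx? (p : List Char → Bool) :
    ∀ (xs : List (List Char)) (j : Nat), xs.findIdx? p = some j →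
    xs.takeWhile (fun x => !p x) = xs.take j := by
  intro xs
  induction xs with
  | nil => intro j h; simp at h
  | cons x xs ih =>
    intro j h
    rw [List.findIdx?_cons] at h
    by_cases hx : p x = true
    · simp [hx] at h
      subst h; simp [hx]
    · have hx' : p x = false := by revert hx; cases p x <;> simp
      simp [hx'] at h
      obtain ⟨j', hj', rfl⟩ := h
      simp [hx', ih j' hj']

theorem pv_takeWhile_not_of_findIdx?_none (p : List Char → Bool)
    (xs : List (List Char)) (h : xs.findIdx? p = none) :
    xs.takeWhile (fun x => !p x) = xs := by
  rw [List.takeWhile_eq_self_iff]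
  intro x hx
  simp [List.findIdx?_eq_none_iff.mp h x hx]

-- A's flag loop computes exactly B's locate-and-slice result
theorem pv_loopA_eq (ls : List (List Char)) :
    pvLoopA ls [] false =
      (match ls.findIdx? pvIsProg with
       | none => []
       | some i =>
         match (ls.drop i).findIdx? pvIsTerm with
         | none => ls.drop i
         | some j => (ls.drop i).take j) := by
  induction ls with
  | nil => simp [pvLoopA]
  | cons l ls ih =>
    by_cases hp : pvIsProg l = true
    · have ht := pv_isProg_not_isTerm l hp
      rw [List.findIdx?_cons]
      simp only [hp]
      have hloop : pvLoopA (l :: ls) [] false = l :: ls.takeWhile (fun x => !pvIsTerm x) := by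
        simp [pvLoopA, hp, ht, pv_loopA_true]
      rw [hloop]
      have hfind : (l :: ls).findIdx? pvIsTerm =
          Option.map (fun i => i + 1) (ls.findIdx? pvIsTerm) := by
        rw [List.findIdx?_cons, if_neg (by simp [ht])]
      cases hf : ls.findIdx? pvIsTerm with
      | none => simp [hfind, hf, pv_takeWhile_not_of_findIdx?_none pvIsTerm ls hf]
      | some j => simp [hfind, hf, pv_takeWhile_not_of_findIdx? pvIsTerm ls j hf]
    · have hp' : pvIsProg l = false := by revert hp; cases pvIsProg l <;> simp
      have hloop : pvLoopA (l :: ls) [] false = pvLoopA ls [] false := by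
        simp [pvLoopA, hp']
      rw [hloop, ih, List.findIdx?_cons, if_neg (by simp [hp'])]
      cases hf : ls.findIdx? pvIsProg with
      | none => simp
      | some i => simp

theorem pv_result_ne_nil (ls : List (List Char)) (i : Nat)
    (hfi : ls.findIdx? pvIsProg = some i) :
    (match (ls.drop i).findIdx? pvIsTerm with
     | none => ls.drop i
     | some j => (ls.drop i).take j) ≠ [] := by
  obtain ⟨hi, hpi, -⟩ := List.findIdx?_eq_some_iff_getElem.mp hfi
  have hdrop : ls.drop i ≠ [] := by
    intro h
    have := List.drop_eq_nil_iff.mp h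
    omega
  cases hf : (ls.drop i).findIdx? pvIsTerm with
  | none => simpa using hdrop
  | some j =>
    obtain ⟨hj, hpj, -⟩ := List.findIdx?_eq_some_iff_getElem.mp hf
    have hj0 : j ≠ 0 := by
      intro h
      subst h
      have h0 : (ls.drop i)[0] = ls[i] := by
        simp
      rw [h0] at hpj
      rw [pv_isProg_not_isTerm _ hpi] at hpj
      exact Bool.false_ne_true hpj
    simp only []
    intro h
    have := List.take_eq_nil_iff.mp h
    rcases this with h1 | h1
    · exact hj0 h1
    · exact hdrop h1

-- ===== VERDICT (by name: the statement is the Claim_ definition above) =====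
theorem extract_ast_spec : Claim_equal_extract_ast := by
  intro output _
  unfold Spec_extract_ast extract_ast extract_ast_alt
  set ls := PySem.Chars.splitOn output.toList ['\n'] with hls
  cases hfi : ls.findIdx? pvIsProg with
  | none =>
    simp only [hfi]
    rw [pv_loopA_eq, hfi]
    simp
  | some i =>
    have hIn : PySem.Chars.isIn "Program".toList output.toList = true := by
      obtain ⟨hi, hpi, -⟩ := List.findIdx?_eq_some_iff_getElem.mp hfi
      rw [PySem.Chars.isIn_iff_infix]
      exact (pv_isProg_infix _ hpi).trans
        (pv_mem_splitOn_infix _ _ _ (List.getElem_mem hi))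
    rw [if_pos hIn, pv_loopA_eq, hfi]
    have hne := pv_result_ne_nil ls i hfi
    cases hf : (ls.drop i).findIdx? pvIsTerm with
    | none =>
      simp only [hf] at hne ⊢
      rw [if_pos hne]
      simp only [hfi, hf]
    | some j =>
      simp only [hf] at hne ⊢
      rw [if_pos hne]
      simp only [hfi, hf]
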